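-- pv_equiv track=rewrite | github.com/primrose101/CS322 | finite_state_machines/keywords.py | kwcolon_fsm
-- ===== SOURCE A (Python) =====
-- def kwcolon_fsm(string_input, index):
--     i = index
--
--     table = [
--         [1, 2],
--         [2, 2],
--         [2, 2],
--
--     ]
--
--     state = 0
--     inputstate = 0
--
--     string_length = len(string_input)
--
--     while i != string_length:
--         if string_input[i] == ':':
--             inputstate = 0
--         else:
--             inputstate = 1
--
--         state = table[state][inputstate]
--
--         if state == 2:
--             break
--
--         i += 1
--
--     return i - index
-- ===== SOURCE B (Python) =====
-- def kwcolon_fsm(string_input, index):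
--     if index != len(string_input) and string_input[index] == ':':
--         return 1
--     return 0
-- ===== Notes on version B (the rewrite author's own statement) =====
-- stated objective: simpler
-- what changed: Replaced the FSM transition table and while-loop with a single direct check: 1 if the character at index is ':' else 0, guarded by index != len so index == len returns 0 without indexing just as the loop never enters.
import Mathlib
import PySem

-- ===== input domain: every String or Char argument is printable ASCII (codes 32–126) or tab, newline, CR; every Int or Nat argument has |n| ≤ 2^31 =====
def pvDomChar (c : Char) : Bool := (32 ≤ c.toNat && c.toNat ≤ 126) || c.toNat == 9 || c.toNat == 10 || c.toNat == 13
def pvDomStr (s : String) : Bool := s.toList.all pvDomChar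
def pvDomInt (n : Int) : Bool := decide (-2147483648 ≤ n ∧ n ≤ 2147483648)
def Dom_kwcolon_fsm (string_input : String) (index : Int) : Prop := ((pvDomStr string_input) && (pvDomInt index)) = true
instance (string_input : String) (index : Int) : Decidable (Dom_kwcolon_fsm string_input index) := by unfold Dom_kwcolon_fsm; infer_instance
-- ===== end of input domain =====

-- B replaces A's FSM transition table and while-loop with a single direct character check (objective: simpler).

-- ===== PORT A =====
-- Literal port of A's while-loop. `fuel` only bounds the recursion to make it
-- total (the Python loop ends after at most two iterations: state 0 → 1 → break);
-- `none` from pyGet? is Python's IndexError, excluded by Pre_ (the port returns i there).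
def kwcolon_loop (cs : List Char) (n : Int) (table : List (List Int))
    (fuel : Nat) (i : Int) (state : Int) : Int :=
  match fuel with
  | 0 => i
  | fuel + 1 =>
    if i = n then i
    else
      match PySem.List.pyGet? cs i with
      | none => i   -- IndexError: outside Pre_
      | some c =>
        let inputstate : Int := if c = ':' then 0 else 1
        let state' := ((PySem.List.pyGet? table state).bind
          (fun row => PySem.List.pyGet? row inputstate)).getD 0
        if state' = 2 then i
        else kwcolon_loop cs n table fuel (i + 1) state'

def kwcolon_fsm (string_input : String) (index : Int) : Int :=
  let table : List (List Int) := [[1, 2], [2, 2], [2, 2]]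
  let cs := string_input.toList
  let n : Int := cs.length
  kwcolon_loop cs n table (cs.length + 2) index 0 - index

-- ===== PORT B =====
def kwcolon_fsm_alt (string_input : String) (index : Int) : Int :=
  if index ≠ (string_input.toList.length : Int) ∧
      PySem.Str.pyGet? string_input index = some ':' then 1 else 0

-- ===== PRECONDITION & SPEC =====
-- Pre_: index == len(string_input) (loop never entered) or index a valid
-- (possibly negative) Python index; elsewhere both Pythons raise IndexError.
def Pre_kwcolon_fsm (string_input : String) (index : Int) : Prop :=
  index = (string_input.toList.length : Int) ∨
    PySem.Raise.InRange string_input.toList.length index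
instance (string_input : String) (index : Int) : Decidable (Pre_kwcolon_fsm string_input index) := by unfold Pre_kwcolon_fsm; infer_instance

def pvWitness_kwcolon_fsm : String × Int := ("a:", 1)

def Spec_kwcolon_fsm (string_input : String) (index : Int) (out : Int) : Prop := out = kwcolon_fsm_alt string_input index
instance (string_input : String) (index : Int) (out : Int) : Decidable (Spec_kwcolon_fsm string_input index out) := by unfold Spec_kwcolon_fsm; infer_instance

-- ===== CLAIM (what is proved, stated in full; the proofs are below) =====
def Claim_equal_kwcolon_fsm : Prop := ∀ (string_input : String) (index : Int), Dom_kwcolon_fsm string_input index → Pre_kwcolon_fsm string_input index → Spec_kwcolon_fsm string_input index (kwcolon_fsm string_input index)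

-- ===== LEMMAS AND PROOFS =====

-- A valid (possibly negative) Python index always yields a character.
theorem pyGet?_some_of_bounds (cs : List Char) (i : Int)
    (h1 : -(cs.length : Int) ≤ i) (h2 : i < (cs.length : Int)) :
    ∃ c, PySem.List.pyGet? cs i = some c := by
  by_cases h3 : 0 ≤ i
  · have hlt : i.toNat < cs.length := by omega
    exact ⟨cs[i.toNat], by
      simp [PySem.List.pyGet?, PySem.List.pyIdx?, h3, h2, hlt]⟩
  · have hlt : cs.length - (-i).toNat < cs.length := by omega
    exact ⟨cs[cs.length - (-i).toNat], by
      simp [PySem.List.pyGet?, PySem.List.pyIdx?, h3, h1, hlt]⟩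

-- In state 1 every transition of A's table goes to the accepting state 2, so the
-- loop returns its current index immediately (whatever the character, or at i = n).
theorem kwcolon_loop_state1 (cs : List Char) (n : Int) (f : Nat) (i : Int) :
    kwcolon_loop cs n [[1, 2], [2, 2], [2, 2]] (f + 1) i 1 = i := by
  unfold kwcolon_loop
  by_cases hn : i = n
  · simp [hn]
  · rcases h : PySem.List.pyGet? cs i with _ | c
    · simp [hn]
    · by_cases hc : c = ':' <;> simp [hn, hc]

-- First iteration of the loop: a ':' advances once (state 1, which then breaks);
-- anything else sends state 0 straight to 2 and breaks in place.
theorem kwcolon_loop_start (cs : List Char) (n : Int) (f : Nat) (i : Int) (c : Char)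
    (hne : i ≠ n) (h : PySem.List.pyGet? cs i = some c) :
    kwcolon_loop cs n [[1, 2], [2, 2], [2, 2]] (f + 2) i 0 =
      if c = ':' then i + 1 else i := by
  show kwcolon_loop cs n [[1, 2], [2, 2], [2, 2]] ((f + 1) + 1) i 0 = _
  unfold kwcolon_loop
  rw [if_neg hne, h]
  by_cases hc : c = ':' <;>
    simp [hc, kwcolon_loop_state1]

-- ===== VERDICT (by name: the statement is the Claim_ definition above) =====
theorem kwcolon_fsm_spec : Claim_equal_kwcolon_fsm := by
  unfold Claim_equal_kwcolon_fsm
  intro s index _ hPre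
  unfold Spec_kwcolon_fsm kwcolon_fsm kwcolon_fsm_alt
  rcases hPre with heq | hin
  · -- index = len: the loop is never entered, both return 0
    simp [kwcolon_loop, heq]
  · -- index a valid (possibly negative) Python index
    have hb : -(s.toList.length : Int) ≤ index ∧ index < s.toList.length := by
      unfold PySem.Raise.InRange at hin; omega
    have hne : index ≠ (s.toList.length : Int) := by omega
    obtain ⟨c, hc⟩ := pyGet?_some_of_bounds s.toList index hb.1 hb.2
    show kwcolon_loop s.toList (s.toList.length : Int) [[1, 2], [2, 2], [2, 2]]
        (s.toList.length + 2) index 0 - index = _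
    rw [kwcolon_loop_start s.toList _ s.toList.length index c hne hc]
    have hlen : s.length = s.toList.length := rfl
    by_cases hcc : c = ':' <;>
      simp [PySem.Str.pyGet?, hc, hcc] <;> omega
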